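-- pv_equiv track=rewrite | github.com/toniIepure25/perceptionVSimagination | src/fmri2img/data/nsd_index_builder.py | build_beta_mapping
-- ===== SOURCE A (Python) =====
-- from typing import Dict, List, Optional, Tuple, Union
--
-- def build_beta_mapping(intervals: List[Tuple[str, int]]) -> Dict[int, Tuple[str, int]]:
--     """
--     Build mapping from global_trial_index to (beta_path, beta_index)
--
--     Args:
--         intervals: List of (beta_path, trial_count) tuples
--
--     Returns:
--         Dict mapping global_trial_index -> (beta_path, intra_file_index)
--     """
--     mapping = {}
--     cumulative_trials = 0
--
--     for beta_path, trial_count in intervals: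
--         for i in range(trial_count):
--             global_idx = cumulative_trials + i
--             mapping[global_idx] = (beta_path, i)
--         cumulative_trials += trial_count
--
--     return mapping
-- ===== SOURCE B (Python) =====
-- def build_beta_mapping(intervals):
--     """
--     Offset-table decomposition: no running accumulator — each interval's global
--     offset is the sum of the trial counts before it, and the dict is built in
--     one shot from the flat (global_idx, (path, i)) stream.
--     """
--     offsets = [sum(tc for _, tc in intervals[:k]) for k in range(len(intervals))]
--     return dict(
--         (off + i, (path, i))
--         for off, (path, tc) in zip(offsets, intervals)
--         for i in range(tc)
--     )
-- ===== Notes on version B (the rewrite author's own statement) =====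
-- stated objective: alternative
-- what changed: Replaces the running cumulative_trials accumulator and per-key dict mutation with a precomputed per-interval offset table (sum of the preceding trial counts) zipped against the intervals, from which the dict is constructed in one shot.
import Mathlib
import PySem

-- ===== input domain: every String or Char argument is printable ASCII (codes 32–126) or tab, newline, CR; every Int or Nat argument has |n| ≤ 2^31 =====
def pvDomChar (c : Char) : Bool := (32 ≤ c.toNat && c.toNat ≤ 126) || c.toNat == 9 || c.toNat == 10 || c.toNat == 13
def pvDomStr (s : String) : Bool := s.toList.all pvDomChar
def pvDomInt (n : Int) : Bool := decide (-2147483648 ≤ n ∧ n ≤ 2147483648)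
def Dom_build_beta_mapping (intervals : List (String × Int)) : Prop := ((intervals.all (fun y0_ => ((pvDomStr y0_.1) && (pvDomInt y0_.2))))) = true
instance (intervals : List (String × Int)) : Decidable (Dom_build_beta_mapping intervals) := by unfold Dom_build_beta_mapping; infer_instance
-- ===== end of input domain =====

-- B replaces A's running cumulative_trials accumulator with a precomputed offset table
-- (sum of the preceding trial counts per interval) and builds the dict in one shot from
-- the flat key/value stream; same return value on every input (alternative decomposition).

-- ===== PORT A =====
-- mapping = {}; cumulative_trials = 0; for beta_path, trial_count in intervals:
--   for i in range(trial_count): mapping[cumulative_trials + i] = (beta_path, i)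
--   cumulative_trials += trial_count
def build_beta_mapping (intervals : List (String × Int)) : List (Int × String × Int) :=
  (intervals.foldl
    (fun (st : PySem.Dict Int (String × Int) × Int) pt =>
      ((PySem.List.pyRange 0 pt.2 1).foldl
        (fun m i => m.insert (st.2 + i) (pt.1, i)) st.1,
       st.2 + pt.2))
    (PySem.Dict.empty, 0)).1.items

-- ===== PORT B =====
-- offsets = [sum(tc for _, tc in intervals[:k]) for k in range(len(intervals))]
--   (k comes from range(len(intervals)), so k ≥ 0 and intervals[:k] is exactly List.take k)
-- return dict((off + i, (path, i)) for off, (path, tc) in zip(offsets, intervals) for i in range(tc))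
def build_beta_mapping_alt (intervals : List (String × Int)) : List (Int × String × Int) :=
  let offsets := (List.range intervals.length).map
    (fun k => ((intervals.take k).map (fun pt => pt.2)).sum)
  let pairs := (offsets.zip intervals).flatMap
    (fun x => (PySem.List.pyRange 0 x.2.2 1).map (fun i => (x.1 + i, (x.2.1, i))))
  (PySem.Dict.ofList pairs).items

-- ===== PRECONDITION & SPEC =====
def Spec_build_beta_mapping (intervals : List (String × Int)) (out : List (Int × String × Int)) : Prop := out = build_beta_mapping_alt intervals
instance (intervals : List (String × Int)) (out : List (Int × String × Int)) : Decidable (Spec_build_beta_mapping intervals out) := by unfold Spec_build_beta_mapping; infer_instance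

-- ===== CLAIM (what is proved, stated in full; the proofs are below) =====
def Claim_equal_build_beta_mapping : Prop := ∀ (intervals : List (String × Int)), Dom_build_beta_mapping intervals → Spec_build_beta_mapping intervals (build_beta_mapping intervals)

-- ===== LEMMAS AND PROOFS =====

-- the flat (key, value) stream both programs insert, with base offset c
def pvFlatPairs (c : Int) : List (String × Int) → List (Int × String × Int)
  | [] => []
  | pt :: rest =>
      (PySem.List.pyRange 0 pt.2 1).map (fun i => (c + i, (pt.1, i))) ++ pvFlatPairs (c + pt.2) rest

def pvInsFold (d : PySem.Dict Int (String × Int)) (ps : List (Int × String × Int)) :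
    PySem.Dict Int (String × Int) :=
  ps.foldl (fun m kv => m.insert kv.1 kv.2) d

lemma pvA_loop (ivs : List (String × Int)) (d : PySem.Dict Int (String × Int)) (c : Int) :
    (ivs.foldl
      (fun (st : PySem.Dict Int (String × Int) × Int) pt =>
        ((PySem.List.pyRange 0 pt.2 1).foldl
          (fun m i => m.insert (st.2 + i) (pt.1, i)) st.1,
         st.2 + pt.2))
      (d, c)).1 = pvInsFold d (pvFlatPairs c ivs) := by
  induction ivs generalizing d c with
  | nil => rfl
  | cons pt rest ih =>
      simp only [List.foldl_cons, pvFlatPairs, pvInsFold, List.foldl_append, List.foldl_map]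
      exact ih _ _

lemma pvB_pairs (ivs : List (String × Int)) (c : Int) :
    ((((List.range ivs.length).map
        (fun k => c + ((ivs.take k).map (fun pt => pt.2)).sum)).zip ivs).flatMap
      (fun x => (PySem.List.pyRange 0 x.2.2 1).map (fun i => (x.1 + i, (x.2.1, i)))))
    = pvFlatPairs c ivs := by
  induction ivs generalizing c with
  | nil => rfl
  | cons pt rest ih =>
      have hmap : (List.range rest.length).map
          (fun k => c + (((pt :: rest).take (k + 1)).map (fun pt => pt.2)).sum)
          = (List.range rest.length).map
          (fun k => (c + pt.2) + ((rest.take k).map (fun pt => pt.2)).sum) := by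
        refine List.map_congr_left (fun k _ => ?_)
        simp [List.take_succ_cons, add_assoc]
      simp only [List.length_cons, List.range_succ_eq_map, List.map_cons, List.map_map,
        Function.comp_def, List.take_zero, List.map_nil, List.sum_nil, add_zero,
        List.zip_cons_cons, List.flatMap_cons, pvFlatPairs]
      rw [show (fun k => c + (((pt :: rest).take (k + 1)).map (fun pt => pt.2)).sum)
            = fun k => c + ((pt.2 :: (rest.take k).map (fun pt => pt.2)).sum) from rfl]
      simp only [List.sum_cons, ← add_assoc]
      rw [ih (c + pt.2)]

lemma pvB_pairs_zero (ivs : List (String × Int)) :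
    ((((List.range ivs.length).map
        (fun k => ((ivs.take k).map (fun pt => pt.2)).sum)).zip ivs).flatMap
      (fun x => (PySem.List.pyRange 0 x.2.2 1).map (fun i => (x.1 + i, (x.2.1, i)))))
    = pvFlatPairs 0 ivs := by
  rw [← pvB_pairs ivs 0]
  simp only [zero_add]

lemma pvOfList_eq_insFold (ps : List (Int × String × Int)) :
    PySem.Dict.ofList ps = pvInsFold PySem.Dict.empty ps := by
  rfl

-- ===== VERDICT (by name: the statement is the Claim_ definition above) =====
theorem build_beta_mapping_spec : Claim_equal_build_beta_mapping := by
  intro intervals _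
  show build_beta_mapping intervals = build_beta_mapping_alt intervals
  unfold build_beta_mapping build_beta_mapping_alt
  rw [pvA_loop]
  show (pvInsFold PySem.Dict.empty (pvFlatPairs 0 intervals)).items =
    (PySem.Dict.ofList ((((List.range intervals.length).map
        (fun k => ((intervals.take k).map (fun pt => pt.2)).sum)).zip intervals).flatMap
      (fun x => (PySem.List.pyRange 0 x.2.2 1).map (fun i => (x.1 + i, (x.2.1, i)))))).items
  rw [pvB_pairs_zero, pvOfList_eq_insFold]
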